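-- pv_equiv track=rewrite | github.com/MarloDelatorre/leetcode | 0007_Reverse_Integer.py | count_places
-- ===== SOURCE A (Python) =====
-- def count_places(x):
--     count = 0
--     while x != 0 and x % 10 == 0:
--         x //= 10
--
--     while x > 0:
--         count += 1
--         x //= 10
--     return count
-- ===== SOURCE B (Python) =====
-- def count_places(x):
--     if x <= 0:
--         return 0
--     return len(str(x).rstrip('0'))
-- ===== Notes on version B (the rewrite author's own statement) =====
-- stated objective: idiomatic
-- what changed: Replaces the two arithmetic div/mod loops (strip trailing zeros, then count digits) with a direct string formulation: len(str(x).rstrip('0')) for positive x, 0 otherwise.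
import Mathlib
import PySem

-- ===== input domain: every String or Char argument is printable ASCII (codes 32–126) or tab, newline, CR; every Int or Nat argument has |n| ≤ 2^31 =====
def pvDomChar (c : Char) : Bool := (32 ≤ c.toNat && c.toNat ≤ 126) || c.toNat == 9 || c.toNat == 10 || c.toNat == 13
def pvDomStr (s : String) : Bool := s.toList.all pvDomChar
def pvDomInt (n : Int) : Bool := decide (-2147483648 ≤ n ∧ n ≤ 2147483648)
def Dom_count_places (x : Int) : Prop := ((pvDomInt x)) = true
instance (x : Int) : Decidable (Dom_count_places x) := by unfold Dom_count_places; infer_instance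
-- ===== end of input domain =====

-- B replaces A's two arithmetic div/mod loops with the string formulation
-- len(str(x).rstrip('0')) for positive x (idiomatic; same cost); return values are equal for all x.


-- ===== PORT A =====
-- first while loop: strip trailing zeros
def cpStrip (x : Int) : Int :=
  if h : x ≠ 0 ∧ PySem.Int.mod x 10 = 0 then cpStrip (PySem.Int.floordiv x 10) else x
termination_by x.natAbs
decreasing_by
  obtain ⟨hne, hm⟩ := h
  obtain ⟨k, hk⟩ : (10 : Int) ∣ x := Int.dvd_of_fmod_eq_zero hm
  subst hk
  simp only [PySem.Int.floordiv, Int.mul_fdiv_cancel_left k (by norm_num : (10:Int) ≠ 0)]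
  have hk0 : k.natAbs ≠ 0 := by simpa using hne
  have h2 : ((10:Int) * k).natAbs = 10 * k.natAbs := by rw [Int.natAbs_mul]; rfl
  omega

-- second while loop: count digits
def cpCount (x : Int) (count : Int) : Int :=
  if h : x > 0 then cpCount (PySem.Int.floordiv x 10) (count + 1) else count
termination_by x.toNat
decreasing_by
  simp only [PySem.Int.floordiv, Int.fdiv_eq_ediv_of_nonneg _ (by norm_num : (0:Int) ≤ 10)]
  omega

def count_places (x : Int) : Int := cpCount (cpStrip x) 0

-- ===== PORT B =====
-- str.rstrip('0') ported by hand (PySem has no right-strip with a char set):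
-- drop '0's from the reversed character list; exact for this single-character strip set.
def rstripZeros (cs : List Char) : List Char := (cs.reverse.dropWhile (· == '0')).reverse

def count_places_alt (x : Int) : Int :=
  if x ≤ 0 then 0 else (rstripZeros (PySem.Int.toChars x)).length

-- ===== PRECONDITION & SPEC =====
def Spec_count_places (x : Int) (out : Int) : Prop := out = count_places_alt x
instance (x : Int) (out : Int) : Decidable (Spec_count_places x out) := by unfold Spec_count_places; infer_instance

-- ===== CLAIM (what is proved, stated in full; the proofs are below) =====
def Claim_equal_count_places : Prop := ∀ (x : Int), Dom_count_places x → Spec_count_places x (count_places x)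

-- ===== LEMMAS AND PROOFS =====

-- toDigitsCore: the accumulator is just appended
lemma toDigitsCore_acc (b : Nat) : ∀ (f n : Nat) (acc : List Char),
    Nat.toDigitsCore b f n acc = Nat.toDigitsCore b f n [] ++ acc := by
  intro f
  induction f with
  | zero => intro n acc; simp [Nat.toDigitsCore]
  | succ f ih =>
    intro n acc
    simp only [Nat.toDigitsCore]
    split
    · rfl
    · rw [ih (n / b) [Nat.digitChar (n % b)], ih (n / b) (Nat.digitChar (n % b) :: acc)]
      simp

-- toDigitsCore: any fuel above n gives the same digits
lemma toDigitsCore_fuel (b : Nat) (hb : 2 ≤ b) : ∀ (n f1 f2 : Nat), n < f1 → n < f2 →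
    Nat.toDigitsCore b f1 n [] = Nat.toDigitsCore b f2 n [] := by
  intro n
  induction n using Nat.strong_induction_on with
  | _ n ih =>
    intro f1 f2 h1 h2
    match f1, f2 with
    | g1 + 1, g2 + 1 =>
      simp only [Nat.toDigitsCore]
      by_cases h0 : n / b = 0
      · simp [h0]
      · have hn0 : 0 < n := by
          rcases Nat.eq_zero_or_pos n with h | h
          · exact absurd (by simp [h]) h0
          · exact h
        have hnb : n / b < n := Nat.div_lt_self hn0 (by omega)
        rw [if_neg h0, if_neg h0, toDigitsCore_acc b g1, toDigitsCore_acc b g2,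
          ih (n / b) hnb g1 g2 (by omega) (by omega)]

lemma toDigits_lt10 (n : Nat) (h : n < 10) : Nat.toDigits 10 n = [Nat.digitChar n] := by
  unfold Nat.toDigits
  simp only [Nat.toDigitsCore]
  rw [Nat.div_eq_of_lt h]
  simp [Nat.mod_eq_of_lt h]

lemma toDigits_step (n : Nat) (h : 10 ≤ n) :
    Nat.toDigits 10 n = Nat.toDigits 10 (n / 10) ++ [Nat.digitChar (n % 10)] := by
  unfold Nat.toDigits
  conv_lhs => simp only [Nat.toDigitsCore]
  have hne : n / 10 ≠ 0 := by omega
  rw [if_neg hne, toDigitsCore_acc]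
  have hf : Nat.toDigitsCore 10 n (n / 10) [] = Nat.toDigitsCore 10 (n / 10 + 1) (n / 10) [] :=
    toDigitsCore_fuel 10 (by norm_num) (n / 10) n (n / 10 + 1) (by omega) (by omega)
  rw [hf]

lemma digitChar_eq_zero (d : Nat) (hd : d < 10) : (Nat.digitChar d == '0') = decide (d = 0) := by
  interval_cases d <;> decide

lemma floordiv_natCast (n : Nat) : PySem.Int.floordiv (n : Int) 10 = ((n / 10 : Nat) : Int) := by
  simp only [PySem.Int.floordiv, Int.fdiv_eq_ediv_of_nonneg _ (by norm_num : (0:Int) ≤ 10)]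
  omega

-- the counting loop computes the digit-string length (positive inputs)
lemma cpCount_eq (n : Nat) : ∀ (c : Int), 1 ≤ n →
    cpCount (n : Int) c = c + (Nat.toDigits 10 n).length := by
  induction n using Nat.strong_induction_on with
  | _ n ih =>
    intro c hn
    rw [cpCount, dif_pos (by exact_mod_cast hn), floordiv_natCast]
    rcases Nat.lt_or_ge n 10 with h | h
    · rw [Nat.div_eq_of_lt h, toDigits_lt10 n h, cpCount]
      norm_num
    · rw [ih (n / 10) (Nat.div_lt_self (by omega) (by omega)) (c + 1) (by omega),
        toDigits_step n h]
      simp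
      omega

-- strip-then-count = length of the right-'0'-stripped digit string
lemma strip_count_eq (n : Nat) (hn : 1 ≤ n) :
    cpCount (cpStrip (n : Int)) 0 =
      (((Nat.toDigits 10 n).reverse.dropWhile (· == '0')).reverse).length := by
  induction n using Nat.strong_induction_on with
  | _ n ih =>
    rw [cpStrip.eq_def]
    have hmod : PySem.Int.mod (n : Int) 10 = ((n % 10 : Nat) : Int) := by
      simp only [PySem.Int.mod, Int.fmod_eq_emod_of_nonneg _ (by norm_num : (0:Int) ≤ 10)]
      omega
    by_cases hz : n % 10 = 0
    · -- trailing zero: both sides lose exactly one '0'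
      have h10 : 10 ≤ n := by omega
      rw [dif_pos ⟨by exact_mod_cast (by omega : (n : Int) ≠ 0), by rw [hmod, hz]; rfl⟩,
        floordiv_natCast, ih (n / 10) (Nat.div_lt_self (by omega) (by omega)) (by omega),
        toDigits_step n h10, hz]
      simp [show (Nat.digitChar 0 == '0') = true from rfl]
    · -- last digit nonzero: strip is the identity and dropWhile drops nothing
      rw [dif_neg (by
        rintro ⟨-, hm⟩
        rw [hmod] at hm
        exact hz (by exact_mod_cast hm))]
      rw [cpCount_eq n 0 hn]
      have hlast : ∀ l, Nat.toDigits 10 n = l ++ [Nat.digitChar (n % 10)] →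
          ((Nat.toDigits 10 n).reverse.dropWhile (· == '0')).reverse.length =
            (Nat.toDigits 10 n).length := by
        intro l hl
        rw [hl]
        simp [digitChar_eq_zero (n % 10) (Nat.mod_lt n (by omega)), hz]
      rcases Nat.lt_or_ge n 10 with h | h
      · rw [hlast [] (by rw [toDigits_lt10 n h, Nat.mod_eq_of_lt h]; rfl)]; omega
      · rw [hlast _ (toDigits_step n h)]; omega

-- nonpositive inputs: the strip loop keeps x nonpositive, the count loop returns 0
lemma cpStrip_nonpos_aux (m : Nat) : ∀ (x : Int), x.natAbs = m → x ≤ 0 → cpStrip x ≤ 0 := by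
  induction m using Nat.strong_induction_on with
  | _ m ih =>
    intro x hm hx
    rw [cpStrip.eq_def]
    split
    · rename_i h
      obtain ⟨hne, hfm⟩ := h
      obtain ⟨k, hk⟩ : (10 : Int) ∣ x := Int.dvd_of_fmod_eq_zero hfm
      subst hk
      have hfd : PySem.Int.floordiv (10 * k) 10 = k := by
        simp [PySem.Int.floordiv, Int.mul_fdiv_cancel_left k (by norm_num : (10:Int) ≠ 0)]
      rw [hfd]
      have hk0 : k.natAbs ≠ 0 := by simpa using hne
      have h2 : ((10:Int) * k).natAbs = 10 * k.natAbs := by rw [Int.natAbs_mul]; rfl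
      exact ih k.natAbs (by omega) k rfl (by omega)
    · exact hx

lemma cpStrip_nonpos (x : Int) (hx : x ≤ 0) : cpStrip x ≤ 0 :=
  cpStrip_nonpos_aux x.natAbs x rfl hx

lemma cpCount_nonpos (x : Int) (hx : x ≤ 0) : cpCount x 0 = 0 := by
  rw [cpCount, dif_neg (by omega)]

-- ===== VERDICT (by name: the statement is the Claim_ definition above) =====
theorem count_places_spec : Claim_equal_count_places := by
  intro x _
  unfold Spec_count_places count_places count_places_alt
  by_cases hx : x ≤ 0
  · rw [if_pos hx, cpCount_nonpos _ (cpStrip_nonpos x hx)]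
  · rw [if_neg hx]
    have hx1 : 1 ≤ x.toNat := by omega
    have hxe : (x.toNat : Int) = x := Int.toNat_of_nonneg (by omega)
    have hch : PySem.Int.toChars x = Nat.toDigits 10 x.toNat := by
      simp only [PySem.Int.toChars, if_neg (by omega : ¬ x < 0)]
    calc cpCount (cpStrip x) 0 = cpCount (cpStrip ((x.toNat : Nat) : Int)) 0 := by rw [hxe]
      _ = (((Nat.toDigits 10 x.toNat).reverse.dropWhile (· == '0')).reverse).length :=
          strip_count_eq x.toNat hx1
      _ = (rstripZeros (PySem.Int.toChars x)).length := by rw [hch]; rfl
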